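-- pv_equiv track=rewrite | github.com/natschluter/nli-data-permutations | utils_shuffle.py | order_by_class
-- ===== SOURCE A (Python) =====
-- def order_by_class(raw_data, orderbyclass):
--     rd_by_class={'C':[], 'E':[], 'N':[]} #CEN
--     for x in raw_data:
--       if x[0]=='neutral':
--         rd_by_class['N'].append(x)
--       elif x[0]=='entailment':
--         rd_by_class['E'].append(x)
--       else:
--         rd_by_class['C'].append(x)
--     return rd_by_class[orderbyclass[0]]+rd_by_class[orderbyclass[1]]+rd_by_class[orderbyclass[2]]
-- ===== SOURCE B (Python) =====
-- def order_by_class(raw_data, orderbyclass):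
--     is_cls = {'C': lambda x: x[0] not in ('neutral', 'entailment'),
--               'E': lambda x: x[0] == 'entailment',
--               'N': lambda x: x[0] == 'neutral'}
--     return [x for k in (orderbyclass[0], orderbyclass[1], orderbyclass[2])
--             for x in raw_data if is_cls[k](x)]
-- ===== Notes on version B (the rewrite author's own statement) =====
-- stated objective: alternative
-- what changed: Drops A's mutable three-bucket partition loop: B is order-driven, dispatching each of the three requested letters through a predicate table and scanning raw_data once per letter (a flat comprehension of filters), so no buckets are built or mutated.
import Mathlib
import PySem

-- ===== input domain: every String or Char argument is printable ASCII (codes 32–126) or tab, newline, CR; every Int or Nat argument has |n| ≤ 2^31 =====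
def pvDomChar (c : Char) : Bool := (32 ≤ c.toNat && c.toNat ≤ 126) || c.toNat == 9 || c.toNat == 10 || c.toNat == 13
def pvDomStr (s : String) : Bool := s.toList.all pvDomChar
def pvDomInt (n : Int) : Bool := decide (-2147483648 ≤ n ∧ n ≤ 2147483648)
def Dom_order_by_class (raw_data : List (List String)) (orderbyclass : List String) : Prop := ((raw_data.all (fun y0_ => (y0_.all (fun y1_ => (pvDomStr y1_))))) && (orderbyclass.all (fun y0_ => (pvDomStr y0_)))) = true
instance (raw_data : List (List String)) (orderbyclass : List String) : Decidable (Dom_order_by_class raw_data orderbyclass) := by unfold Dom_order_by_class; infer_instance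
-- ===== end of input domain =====

-- B drops A's dict-of-three-buckets partition: it dispatches the three requested letters through a
-- predicate table and scans raw_data once per letter (flatMap of filters); alternative decomposition, same cost.

-- ===== PORT A =====
-- A: one loop, appending each row to the bucket chosen by an if/elif/else chain on x[0].
def order_by_class (raw_data : List (List String)) (orderbyclass : List String) : List (List String) :=
  let d0 : PySem.Dict String (List (List String)) :=
    ((PySem.Dict.empty.insert "C" []).insert "E" []).insert "N" []
  let d := raw_data.foldl (fun d x =>
    let h := (PySem.List.pyGet? x 0).getD ""   -- x[0]; Pre_ rules out empty rows (IndexError)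
    if h == "neutral" then d.modify "N" [] (fun l => l ++ [x])
    else if h == "entailment" then d.modify "E" [] (fun l => l ++ [x])
    else d.modify "C" [] (fun l => l ++ [x])) d0
  -- dict[orderbyclass[i]]: Pre_ rules out KeyError and IndexError, so getD is exact here
  d.getD ((PySem.List.pyGet? orderbyclass 0).getD "") [] ++
  d.getD ((PySem.List.pyGet? orderbyclass 1).getD "") [] ++
  d.getD ((PySem.List.pyGet? orderbyclass 2).getD "") []

-- ===== PORT B =====
-- B: predicate table is_cls, then a flat double comprehension over the three requested letters.
-- is_cls[k] (KeyError for unknown k) is ported as getD with an always-false default predicate;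
-- Pre_ rules those inputs out, and x[0] (IndexError on an empty row, also excluded) as pyGet?.getD.
def order_by_class_alt (raw_data : List (List String)) (orderbyclass : List String) : List (List String) :=
  let is_cls : PySem.Dict String (List String → Bool) :=
    ((PySem.Dict.empty.insert "C" (fun x =>
        !((PySem.List.pyGet? x 0).getD "" == "neutral") && !((PySem.List.pyGet? x 0).getD "" == "entailment"))).insert
      "E" (fun x => (PySem.List.pyGet? x 0).getD "" == "entailment")).insert
      "N" (fun x => (PySem.List.pyGet? x 0).getD "" == "neutral")
  [(PySem.List.pyGet? orderbyclass 0).getD "", (PySem.List.pyGet? orderbyclass 1).getD "",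
   (PySem.List.pyGet? orderbyclass 2).getD ""].flatMap
    (fun k => raw_data.filter (fun x => is_cls.getD k (fun _ => false) x))

-- ===== PRECONDITION & SPEC =====
-- Pre_ excludes exactly the inputs where Python A raises: an empty row (IndexError on x[0]),
-- fewer than three class letters (IndexError), or a letter other than 'C'/'E'/'N' among the first three (KeyError).
def Pre_order_by_class (raw_data : List (List String)) (orderbyclass : List String) : Prop :=
  (∀ x ∈ raw_data, x ≠ []) ∧ 3 ≤ orderbyclass.length ∧
    ∀ k ∈ orderbyclass.take 3, k ∈ (["C", "E", "N"] : List String)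
instance (raw_data : List (List String)) (orderbyclass : List String) : Decidable (Pre_order_by_class raw_data orderbyclass) := by unfold Pre_order_by_class; infer_instance

def pvWitness_order_by_class : List (List String) × List String :=
  ([["neutral", "a"], ["entailment", "b"], ["contradiction", "c"]], ["N", "C", "E"])

def Spec_order_by_class (raw_data : List (List String)) (orderbyclass : List String) (out : List (List String)) : Prop := out = order_by_class_alt raw_data orderbyclass
instance (raw_data : List (List String)) (orderbyclass : List String) (out : List (List String)) : Decidable (Spec_order_by_class raw_data orderbyclass out) := by unfold Spec_order_by_class; infer_instance

-- ===== CLAIM (what is proved, stated in full; the proofs are below) =====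
def Claim_equal_order_by_class : Prop := ∀ (raw_data : List (List String)) (orderbyclass : List String), Dom_order_by_class raw_data orderbyclass → Pre_order_by_class raw_data orderbyclass → Spec_order_by_class raw_data orderbyclass (order_by_class raw_data orderbyclass)

-- ===== LEMMAS AND PROOFS =====

-- the class letter A's if/elif/else chain selects for a row (proof-side helper)
def clsB (x : List String) : String :=
  if (PySem.List.pyGet? x 0).getD "" == "neutral" then "N"
  else if (PySem.List.pyGet? x 0).getD "" == "entailment" then "E" else "C"

lemma cls_C (x : List String) : (clsB x == "C")
    = (!((PySem.List.pyGet? x 0).getD "" == "neutral") && !((PySem.List.pyGet? x 0).getD "" == "entailment")) := by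
  simp only [clsB]; split_ifs with h1 h2 <;> simp_all

lemma cls_E (x : List String) : (clsB x == "E") = ((PySem.List.pyGet? x 0).getD "" == "entailment") := by
  simp only [clsB]; split_ifs with h1 h2 <;> simp_all

lemma cls_N (x : List String) : (clsB x == "N") = ((PySem.List.pyGet? x 0).getD "" == "neutral") := by
  simp only [clsB]; split_ifs with h1 h2 <;> simp_all

-- looking the letter k up in B's predicate table and filtering = filtering by clsB = k
lemma keyFilter (raw_data : List (List String)) (k : String) (hk : k ∈ (["C", "E", "N"] : List String)) :
    raw_data.filter (fun x =>
      (((PySem.Dict.empty.insert "C" (fun x =>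
          !((PySem.List.pyGet? x 0).getD "" == "neutral") && !((PySem.List.pyGet? x 0).getD "" == "entailment"))).insert
        "E" (fun x => (PySem.List.pyGet? x 0).getD "" == "entailment")).insert
        "N" (fun x => (PySem.List.pyGet? x 0).getD "" == "neutral")).getD k (fun _ => false) x)
    = raw_data.filter (fun x => clsB x == k) := by
  simp only [List.mem_cons, List.not_mem_nil, or_false] at hk
  rcases hk with rfl | rfl | rfl
  · rw [show (((PySem.Dict.empty.insert "C" (fun x : List String =>
          !((PySem.List.pyGet? x 0).getD "" == "neutral") && !((PySem.List.pyGet? x 0).getD "" == "entailment"))).insert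
        "E" (fun x => (PySem.List.pyGet? x 0).getD "" == "entailment")).insert
        "N" (fun x => (PySem.List.pyGet? x 0).getD "" == "neutral")).getD "C" (fun _ => false)
      = (fun x : List String =>
          !((PySem.List.pyGet? x 0).getD "" == "neutral") && !((PySem.List.pyGet? x 0).getD "" == "entailment")) from rfl]
    exact (List.filter_congr (fun x _ => (cls_C x))).symm
  · rw [show (((PySem.Dict.empty.insert "C" (fun x : List String =>
          !((PySem.List.pyGet? x 0).getD "" == "neutral") && !((PySem.List.pyGet? x 0).getD "" == "entailment"))).insert
        "E" (fun x => (PySem.List.pyGet? x 0).getD "" == "entailment")).insert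
        "N" (fun x => (PySem.List.pyGet? x 0).getD "" == "neutral")).getD "E" (fun _ => false)
      = (fun x : List String => (PySem.List.pyGet? x 0).getD "" == "entailment") from rfl]
    exact (List.filter_congr (fun x _ => (cls_E x))).symm
  · rw [show (((PySem.Dict.empty.insert "C" (fun x : List String =>
          !((PySem.List.pyGet? x 0).getD "" == "neutral") && !((PySem.List.pyGet? x 0).getD "" == "entailment"))).insert
        "E" (fun x => (PySem.List.pyGet? x 0).getD "" == "entailment")).insert
        "N" (fun x => (PySem.List.pyGet? x 0).getD "" == "neutral")).getD "N" (fun _ => false)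
      = (fun x : List String => (PySem.List.pyGet? x 0).getD "" == "neutral") from rfl]
    exact (List.filter_congr (fun x _ => (cls_N x))).symm

lemma step_eq (d : PySem.Dict String (List (List String))) (x : List String) :
    (let h := (PySem.List.pyGet? x 0).getD ""
     if h == "neutral" then d.modify "N" [] (fun l => l ++ [x])
     else if h == "entailment" then d.modify "E" [] (fun l => l ++ [x])
     else d.modify "C" [] (fun l => l ++ [x]))
    = d.modify (clsB x) [] (fun l => l ++ [x]) := by
  simp only [clsB]
  split_ifs <;> rfl

lemma fold_getD' (raw_data : List (List String)) (d : PySem.Dict String (List (List String))) (k : String) :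
    (raw_data.foldl (fun d x => d.modify (clsB x) [] (fun l => l ++ [x])) d).getD k []
    = d.getD k [] ++ raw_data.filter (fun x => clsB x == k) := by
  induction raw_data generalizing d with
  | nil => simp
  | cons x xs ih =>
    simp only [List.foldl_cons, List.filter_cons, ih, PySem.Dict.getD_modify]
    by_cases h : k = clsB x
    · simp [h]
    · simp [h, Ne.symm h]

lemma fold_getD (raw_data : List (List String)) (d : PySem.Dict String (List (List String))) (k : String) :
    (raw_data.foldl (fun d x =>
      let h := (PySem.List.pyGet? x 0).getD ""
      if h == "neutral" then d.modify "N" [] (fun l => l ++ [x])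
      else if h == "entailment" then d.modify "E" [] (fun l => l ++ [x])
      else d.modify "C" [] (fun l => l ++ [x])) d).getD k []
    = d.getD k [] ++ raw_data.filter (fun x => clsB x == k) := by
  simp only [step_eq]
  exact fold_getD' raw_data d k

lemma d0_getD (k : String) (hk : k ∈ (["C", "E", "N"] : List String)) :
    ((((PySem.Dict.empty.insert "C" ([] : List (List String))).insert "E" []).insert "N" []).getD k []) = [] := by
  simp only [List.mem_cons, List.not_mem_nil, or_false] at hk
  rcases hk with rfl | rfl | rfl <;> decide

-- ===== VERDICT (by name: the statement is the Claim_ definition above) =====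
theorem order_by_class_spec : Claim_equal_order_by_class := by
  intro raw_data orderbyclass _ hpre
  obtain ⟨hrows, hlen, hkeys⟩ := hpre
  match orderbyclass, hlen with
  | a :: b :: c :: t, _ =>
    have ha := hkeys a (by simp)
    have hb := hkeys b (by simp)
    have hc := hkeys c (by simp)
    show order_by_class _ _ = order_by_class_alt _ _
    simp only [order_by_class, order_by_class_alt]
    rw [show PySem.List.pyGet? (a :: b :: c :: t) 0 = some a by
          rw [show (0:Int) = ((0:Nat):Int) from rfl, PySem.List.pyGet?_natCast]; rfl,
        show PySem.List.pyGet? (a :: b :: c :: t) 1 = some b by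
          rw [show (1:Int) = ((1:Nat):Int) from rfl, PySem.List.pyGet?_natCast]; rfl,
        show PySem.List.pyGet? (a :: b :: c :: t) 2 = some c by
          rw [show (2:Int) = ((2:Nat):Int) from rfl, PySem.List.pyGet?_natCast]; rfl]
    simp only [Option.getD_some]
    rw [fold_getD, fold_getD, fold_getD, d0_getD _ ha, d0_getD _ hb, d0_getD _ hc]
    simp only [List.flatMap, List.map_cons, List.map_nil, List.flatten]
    rw [keyFilter _ _ ha, keyFilter _ _ hb, keyFilter _ _ hc]
    simp
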